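-- pv_equiv track=rewrite | github.com/bohdanvan/advent-of-code | src/advent_of_code_2023/day11/day11.py | createExtensionMap
-- ===== SOURCE A (Python) =====
-- from typing import List, Tuple, TypeVar, TypedDict
--
-- class ExtensionMap(TypedDict):
--     row_idx_map: List[int]
--     col_idx_map: List[int]
--
-- GALAXY_SYMBOL = "#"
--
-- def createExtensionMap(image: List[str], expansion_length) -> ExtensionMap:
--     row_with_galaxy = [False for i in range(len(image))]
--     col_with_galaxy = [False for j in range(len(image[0]))]
--
--     for i in range(len(image)):
--         for j in range(len(image[i])):
--             if image[i][j] == GALAXY_SYMBOL: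
--                 row_with_galaxy[i] = True
--                 col_with_galaxy[j] = True
--
--     row_idx_map = [0]
--     for i in range(1, len(row_with_galaxy)):
--         row_idx_map.append(
--             row_idx_map[i - 1] + (1 if row_with_galaxy[i - 1] else expansion_length)
--         )
--
--     col_idx_map = [0]
--     for j in range(1, len(col_with_galaxy)):
--         col_idx_map.append(
--             col_idx_map[j - 1] + (1 if col_with_galaxy[j - 1] else expansion_length)
--         )
--
--     return ExtensionMap(row_idx_map=row_idx_map, col_idx_map=col_idx_map)
-- ===== SOURCE B (Python) =====
-- from bisect import bisect_left
-- from typing import List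
--
-- GALAXY_SYMBOL = "#"
--
-- def createExtensionMap(image: List[str], expansion_length):
--     width = len(image[0])
--
--     # sorted lists of the empty row / empty column indices
--     empty_rows = [i for i in range(len(image)) if GALAXY_SYMBOL not in image[i]]
--     galaxy_cols = set()
--     for row in image:
--         for j, ch in enumerate(row):
--             if ch == GALAXY_SYMBOL:
--                 galaxy_cols.add(j)
--     empty_cols = [j for j in range(width) if j not in galaxy_cols]
--
--     # closed form: index i maps to i + (E-1) * (number of empty lines before i);
--     # that count is found by binary search in the sorted empty-index list.
--     def index_map(n, empties):
--         return [0] + [i + (expansion_length - 1) * bisect_left(empties, i)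
--                       for i in range(1, n)]
--
--     return {
--         "row_idx_map": index_map(len(image), empty_rows),
--         "col_idx_map": index_map(width, empty_cols),
--     }
-- ===== Notes on version B (the rewrite author's own statement) =====
-- stated objective: alternative
-- what changed: A marks rows/columns in two boolean arrays with a combined nested loop and then builds each index map by an incremental prefix-sum append loop; B instead collects the sorted lists of empty row/column indices (columns via a set of galaxy column positions) and computes every map entry independently by the closed form i + (E-1)*bisect_left(empties, i).
import Mathlib
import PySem

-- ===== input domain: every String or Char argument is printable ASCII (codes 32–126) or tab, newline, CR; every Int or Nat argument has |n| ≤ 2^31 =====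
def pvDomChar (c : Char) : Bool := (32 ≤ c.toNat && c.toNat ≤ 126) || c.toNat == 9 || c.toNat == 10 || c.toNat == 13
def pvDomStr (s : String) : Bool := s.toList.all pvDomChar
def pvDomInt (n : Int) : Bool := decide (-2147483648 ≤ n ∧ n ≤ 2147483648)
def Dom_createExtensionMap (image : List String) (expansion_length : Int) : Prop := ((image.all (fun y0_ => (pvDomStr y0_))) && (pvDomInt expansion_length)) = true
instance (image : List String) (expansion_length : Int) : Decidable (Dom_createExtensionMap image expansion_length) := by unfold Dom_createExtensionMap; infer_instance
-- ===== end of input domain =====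

-- B replaces A's boolean presence arrays and incremental prefix-sum loops by a closed form:
-- it collects the sorted lists of EMPTY row/column indices (columns via a set of galaxy columns)
-- and computes each map entry directly as i + (E-1) * bisect_left(empties, i) (objective: alternative).

-- ===== PORT A =====
-- inner loop: for j in range(len(image[i])): if image[i][j] == '#': row_with_galaxy[i]=True; col_with_galaxy[j]=True
def pvInnerA : List Char → Nat → Nat → List Bool → List Bool → List Bool × List Bool
  | [], _, _, rf, cf => (rf, cf)
  | c :: rest, i, j, rf, cf =>
    if c = '#' then pvInnerA rest i (j + 1) (rf.set i true) (cf.set j true)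
    else pvInnerA rest i (j + 1) rf cf

-- outer loop: for i in range(len(image))
def pvOuterA : List (List Char) → Nat → List Bool → List Bool → List Bool × List Bool
  | [], _, rf, cf => (rf, cf)
  | r :: rest, i, rf, cf =>
    let p := pvInnerA r i 0 rf cf
    pvOuterA rest (i + 1) p.1 p.2

-- for i in range(1, len(flags)): acc.append(acc[i-1] + (1 if flags[i-1] else exp))
def pvBuildA (flags : List Bool) (exp : Int) (i : Nat) (acc : List Int) : List Int :=
  if i < flags.length then
    pvBuildA flags exp (i + 1)
      (acc ++ [acc.getD (i - 1) 0 + (if flags.getD (i - 1) false then 1 else exp)])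
  else acc
termination_by flags.length - i

def createExtensionMap (image : List String) (expansion_length : Int) : List (String × List Int) :=
  let rows := image.map String.toList
  let rowInit : List Bool := rows.map (fun _ => false)
  let colInit : List Bool := (rows.headD []).map (fun _ => false)   -- len(image[0]); headD: on the empty image (outside Pre_) Python raises
  let p := pvOuterA rows 0 rowInit colInit
  [("row_idx_map", pvBuildA p.1 expansion_length 1 [0]),
   ("col_idx_map", pvBuildA p.2 expansion_length 1 [0])]

-- ===== PORT B =====
-- [0] + [i + (E-1)*bisect_left(empties, i) for i in range(1, n)]
def pvIndexMap (expansion_length : Int) (n : Nat) (empties : List Int) : List Int :=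
  0 :: (PySem.List.pyRange 1 (n : Int) 1).map
    (fun i => i + (expansion_length - 1) * (PySem.List.bisectLeft empties i : Int))

def createExtensionMap_alt (image : List String) (expansion_length : Int) : List (String × List Int) :=
  let rows := image.map String.toList
  let width := (rows.headD []).length          -- len(image[0]); on the empty image (outside Pre_) Python raises
  -- empty_rows = [i for i in range(len(image)) if GALAXY_SYMBOL not in image[i]]  ('#' is one char: substring test = char test)
  let emptyRows : List Int :=
    (PySem.List.pyRange 0 (rows.length : Int) 1).filter
      (fun i => !((PySem.List.pyGetD rows i []).contains '#'))
  -- galaxy_cols = set(); for row: for j, ch in enumerate(row): if ch == '#': galaxy_cols.add(j)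
  let galaxyCols : PySem.Set Int :=
    rows.foldl (fun s r =>
      (PySem.List.enumerate r 0).foldl
        (fun s p => if p.2 = '#' then PySem.Set.add s p.1 else s) s) PySem.Set.empty
  -- empty_cols = [j for j in range(width) if j not in galaxy_cols]
  let emptyCols : List Int :=
    (PySem.List.pyRange 0 (width : Int) 1).filter (fun j => !(PySem.Set.contains galaxyCols j))
  [("row_idx_map", pvIndexMap expansion_length image.length emptyRows),
   ("col_idx_map", pvIndexMap expansion_length width emptyCols)]

-- ===== PRECONDITION & SPEC =====
-- Pre_ excludes exactly the inputs where A raises IndexError: the empty image (image[0]) and images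
-- with a '#' at a column index ≥ len(image[0]) (the write col_with_galaxy[j] = True is out of range).
def Pre_createExtensionMap (image : List String) (expansion_length : Int) : Prop :=
  image ≠ [] ∧ ∀ s ∈ image, ∀ m, m < s.toList.length → s.toList.getD m ' ' = '#' →
    m < (image.headD "").toList.length
instance (image : List String) (expansion_length : Int) : Decidable (Pre_createExtensionMap image expansion_length) := by unfold Pre_createExtensionMap; infer_instance

def pvWitness_createExtensionMap : List String × Int := (["#.", ".#"], 5)

def Spec_createExtensionMap (image : List String) (expansion_length : Int) (out : List (String × List Int)) : Prop := out = createExtensionMap_alt image expansion_length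
instance (image : List String) (expansion_length : Int) (out : List (String × List Int)) : Decidable (Spec_createExtensionMap image expansion_length out) := by unfold Spec_createExtensionMap; infer_instance

-- ===== CLAIM (what is proved, stated in full; the proofs are below) =====
def Claim_equal_createExtensionMap : Prop := ∀ (image : List String) (expansion_length : Int), Dom_createExtensionMap image expansion_length → Pre_createExtensionMap image expansion_length → Spec_createExtensionMap image expansion_length (createExtensionMap image expansion_length)

-- ===== LEMMAS AND PROOFS =====

theorem pvInnerA_len (row : List Char) (i j : Nat) (rf cf : List Bool) :
    (pvInnerA row i j rf cf).1.length = rf.length ∧ (pvInnerA row i j rf cf).2.length = cf.length := by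
  induction row generalizing j rf cf with
  | nil => simp [pvInnerA]
  | cons c rest ih =>
    by_cases h : c = '#' <;> simp [pvInnerA, h, ih]

theorem pvOuterA_len (rows : List (List Char)) (i : Nat) (rf cf : List Bool) :
    (pvOuterA rows i rf cf).2.length = cf.length := by
  induction rows generalizing i rf cf with
  | nil => simp [pvOuterA]
  | cons r rest ih =>
    simp only [pvOuterA]
    rw [ih]
    exact (pvInnerA_len r i 0 rf cf).2

-- row flags: the inner loop sets rf[i] to true iff the row contains '#'
theorem pvInnerA_fst (row : List Char) (i j : Nat) (rf cf : List Bool) :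
    (pvInnerA row i j rf cf).1 = if '#' ∈ row then rf.set i true else rf := by
  induction row generalizing j rf cf with
  | nil => simp [pvInnerA]
  | cons c rest ih =>
    by_cases h : c = '#'
    · simp [pvInnerA, h, ih, List.set_set]
    · simp [pvInnerA, h, ih, List.mem_cons, Ne.symm h]

-- column flags after the inner loop, pointwise
theorem pvInnerA_snd_getD (row : List Char) (i : Nat) :
    ∀ (j : Nat) (rf cf : List Bool) (k : Nat),
    (∀ m, (hm : m < row.length) → row[m] = '#' → j + m < cf.length) →
    ((pvInnerA row i j rf cf).2.getD k false = true ↔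
      (cf.getD k false = true ∨ (j ≤ k ∧ k - j < row.length ∧ row.getD (k - j) ' ' = '#'))) := by
  induction row with
  | nil =>
    intro j rf cf k h
    simp [pvInnerA]
  | cons c rest ih =>
    intro j rf cf k h
    by_cases hc : c = '#'
    · have hj : j < cf.length := by
        have := h 0 (by simp) (by simp [hc])
        omega
      rw [pvInnerA, if_pos hc]
      rw [ih (j + 1) _ _ k (by intro m hm hg; have := h (m + 1) (by simpa) (by simpa); simp; omega)]
      have hset : (cf.set j true).getD k false = if k = j then true else cf.getD k false := by
        by_cases hkj : k = j
        · subst hkj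
          simp [List.getD_eq_getElem?_getD, hj]
        · simp [List.getD_eq_getElem?_getD, List.getElem?_set_ne (by omega : j ≠ k)]
          simp [hkj]
      rw [hset]
      by_cases hkj : k = j
      · subst hkj
        simp [hc]
      · rw [if_neg hkj]
        constructor
        · rintro (h1 | ⟨h1, h2, h3⟩)
          · exact Or.inl h1
          · refine Or.inr ⟨by omega, by simp; omega, ?_⟩
            have : k - j = (k - (j + 1)) + 1 := by omega
            rw [this, List.getD_cons_succ]
            exact h3
        · rintro (h1 | ⟨h1, h2, h3⟩)
          · exact Or.inl h1
          · have hjk : j + 1 ≤ k := by omega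
            refine Or.inr ⟨hjk, by simp at h2; omega, ?_⟩
            have : k - j = (k - (j + 1)) + 1 := by omega
            rw [this, List.getD_cons_succ] at h3
            exact h3
    · rw [pvInnerA, if_neg hc]
      rw [ih (j + 1) _ _ k (by intro m hm hg; have := h (m + 1) (by simpa) (by simpa); simp; omega)]
      constructor
      · rintro (h1 | ⟨h1, h2, h3⟩)
        · exact Or.inl h1
        · refine Or.inr ⟨by omega, by simp; omega, ?_⟩
          have : k - j = (k - (j + 1)) + 1 := by omega
          rw [this, List.getD_cons_succ]
          exact h3
      · rintro (h1 | ⟨h1, h2, h3⟩)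
        · exact Or.inl h1
        · by_cases hkj : k = j
          · subst hkj
            simp at h3
            exact absurd h3 hc
          · refine Or.inr ⟨by omega, by simp at h2; omega, ?_⟩
            have : k - j = (k - (j + 1)) + 1 := by omega
            rw [this, List.getD_cons_succ] at h3
            exact h3

theorem pvSet_append (pre : List Bool) (b : Bool) (l : List Bool) :
    (pre ++ b :: l).set pre.length true = pre ++ true :: l := by
  induction pre with
  | nil => simp
  | cons a t ih => simp [ih]

-- row flags after the outer loop
theorem pvOuterA_fst (rows : List (List Char)) :
    ∀ (pre cf : List Bool),
    (pvOuterA rows pre.length (pre ++ rows.map (fun _ => false)) cf).1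
      = pre ++ rows.map (fun r => r.contains '#') := by
  induction rows with
  | nil => intro pre cf; simp [pvOuterA]
  | cons r rest ih =>
    intro pre cf
    simp only [pvOuterA, List.map_cons]
    rw [pvInnerA_fst]
    by_cases hm : '#' ∈ r
    · rw [if_pos hm, pvSet_append]
      have h2 := ih (pre ++ [true]) (pvInnerA r pre.length 0 (pre ++ false :: List.map (fun _ => false) rest) cf).2
      simp only [List.length_append, List.length_cons, List.length_nil, List.append_assoc,
        List.cons_append, List.nil_append] at h2 ⊢
      rw [h2]
      simp
      exact hm
    · rw [if_neg hm]
      have h2 := ih (pre ++ [false]) (pvInnerA r pre.length 0 (pre ++ false :: List.map (fun _ => false) rest) cf).2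
      simp only [List.length_append, List.length_cons, List.length_nil, List.append_assoc,
        List.cons_append, List.nil_append] at h2 ⊢
      rw [h2]
      simp
      exact hm

-- column flags after the outer loop, pointwise
theorem pvOuterA_snd_getD (rows : List (List Char)) :
    ∀ (i : Nat) (rf cf : List Bool) (k : Nat),
    (∀ r ∈ rows, ∀ m, (hm : m < r.length) → r[m] = '#' → m < cf.length) →
    ((pvOuterA rows i rf cf).2.getD k false = true ↔
      (cf.getD k false = true ∨ ∃ r ∈ rows, k < r.length ∧ r.getD k ' ' = '#')) := by
  induction rows with
  | nil => intro i rf cf k h; simp [pvOuterA]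
  | cons r rest ih =>
    intro i rf cf k h
    simp only [pvOuterA]
    have hlen : (pvInnerA r i 0 rf cf).2.length = cf.length := (pvInnerA_len r i 0 rf cf).2
    rw [ih (i + 1) _ _ k (by intro r' hr' m hm hg; rw [hlen]; exact h r' (by simp [hr']) m hm hg)]
    rw [pvInnerA_snd_getD r i 0 rf cf k (by intro m hm hg; simpa using h r (by simp) m hm hg)]
    simp only [List.exists_mem_cons_iff, Nat.sub_zero, Nat.zero_le, true_and]
    tauto

-- the chain of running values of the index map
def pvChain (exp : Int) (x : Int) : List Bool → List Int
  | [] => []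
  | f :: rest => (x + (if f then 1 else exp)) :: pvChain exp (x + (if f then 1 else exp)) rest

theorem pvDropLast_nil {α : Type} (l : List α) (h : l.length ≤ 1) : l.dropLast = [] := by
  rcases l with _ | ⟨a, _ | ⟨b, t⟩⟩ <;> simp_all

theorem pvBuildA_chain (flags : List Bool) (exp : Int) :
    ∀ (d i : Nat) (acc : List Int) (x : Int), flags.length - i ≤ d → acc.length = i →
    acc.getLast? = some x →
    pvBuildA flags exp i acc = acc ++ pvChain exp x ((flags.drop (i - 1)).dropLast) := by
  intro d
  induction d with
  | zero =>
    intro i acc x hd hlen hlast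
    have hi : 0 < i := by
      rcases acc with _ | _
      · simp at hlast
      · simp at hlen; omega
    rw [pvBuildA, if_neg (by omega), pvDropLast_nil _ (by simp; omega)]
    simp [pvChain]
  | succ d ih =>
    intro i acc x hd hlen hlast
    have hi : 0 < i := by
      rcases acc with _ | _
      · simp at hlast
      · simp at hlen; omega
    rw [pvBuildA]
    by_cases h : i < flags.length
    · rw [if_pos h]
      have hgx : acc.getD (i - 1) 0 = x := by
        rw [List.getD_eq_getElem?_getD, ← hlen, ← List.getLast?_eq_getElem?, hlast]
        rfl
      have hgf : flags.getD (i - 1) false = flags[i - 1] := List.getD_eq_getElem _ _ (by omega)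
      have hval : acc.getD (i - 1) 0 + (if flags.getD (i - 1) false then 1 else exp)
          = x + (if flags[i - 1] then 1 else exp) := by rw [hgx, hgf]
      rw [hval]
      have hdrop : flags.drop (i - 1) = flags[i - 1] :: flags.drop i := by
        rw [List.drop_eq_getElem_cons (by omega : i - 1 < flags.length)]
        congr 2
        omega
      have hne : flags.drop i ≠ [] := by simp; omega
      rw [ih (i + 1) (acc ++ [x + (if flags[i - 1] then 1 else exp)])
            (x + (if flags[i - 1] then 1 else exp)) (by omega) (by simp [hlen]) (by simp)]
      rw [hdrop, List.dropLast_cons_of_ne_nil hne]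
      simp [pvChain]
    · rw [if_neg h, pvDropLast_nil _ (by simp; omega)]
      simp [pvChain]

theorem pvGetD_map_false {α : Type} (l : List α) (k : Nat) :
    (l.map (fun _ => false)).getD k false = false := by
  induction l generalizing k with
  | nil => simp
  | cons a t ih =>
    cases k with
    | zero => simp
    | succ n => simpa using ih n

-- the chain as a closed-form map: entry t is x + (t+1) + (E-1) * (#false among the first t+1 flags)
theorem pvChain_eq_map (exp : Int) (l : List Bool) :
    ∀ x : Int, pvChain exp x l = (List.range l.length).map
      (fun (t : Nat) => x + ((t : Int) + 1) + (exp - 1) * ((l.take (t + 1)).countP (fun b => !b) : Int)) := by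
  induction l with
  | nil => intro x; simp [pvChain]
  | cons f rest ih =>
    intro x
    rw [pvChain, List.length_cons, List.range_succ_eq_map, List.map_cons, List.map_map]
    congr 1
    · cases f <;> simp
    · rw [ih (x + if f then 1 else exp)]
      refine List.map_congr_left ?_
      intro t ht
      cases f <;> simp [Function.comp] <;> ring

-- bisect_left on a (≤)-sorted list counts the elements < x
theorem pvBisect_count (l : List Int) (x : Int) (h : l.Pairwise (· ≤ ·)) :
    PySem.List.bisectLeft l x = l.countP (fun y => decide (y < x)) := by
  obtain ⟨hb, hlt, hge⟩ := PySem.List.bisectLeft_spec l x h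
  set b := PySem.List.bisectLeft l x with hbdef
  have h1 : (l.take b).countP (fun y => decide (y < x)) = b := by
    have hall : ∀ a ∈ l.take b, (fun y => decide (y < x)) a = true := by
      intro a ha
      obtain ⟨j, hj, rfl⟩ := List.mem_iff_getElem.mp ha
      rw [List.getElem_take]
      simp
      exact hlt j (by simp at hj; omega) (by simp at hj; omega)
    calc (l.take b).countP (fun y => decide (y < x)) = (l.take b).length := List.countP_eq_length.mpr hall
      _ = b := List.length_take_of_le hb
  have h2 : (l.drop b).countP (fun y => decide (y < x)) = 0 := by
    refine List.countP_eq_zero.mpr ?_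
    intro a ha
    obtain ⟨j, hj, rfl⟩ := List.mem_iff_getElem.mp ha
    rw [List.getElem_drop]
    simp
    exact hge (b + j) (by simp at hj; omega) (by omega)
  conv_rhs => rw [← List.take_append_drop b l]
  rw [List.countP_append, h1, h2]
  omega

theorem pvRangeCountAux (q : Nat → Bool) (flags : List Bool)
    (hq : ∀ k, k < flags.length → q k = !flags.getD k false) :
    ∀ i, i ≤ flags.length → (List.range i).countP q = (flags.take i).countP (fun b => !b) := by
  intro i
  induction i with
  | zero => simp
  | succ i ih =>
    intro hi
    have hil : i < flags.length := by omega
    rw [List.range_succ, List.countP_append, ih (by omega),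
      List.take_succ_eq_append_getElem hil, List.countP_append]
    have : q i = !flags[i] := by
      rw [hq i hil, List.getD_eq_getElem _ _ hil]
    simp [this]

theorem pvRangeRestrict (q : Nat → Bool) (n i : Nat) (hi : i ≤ n) :
    (List.range n).countP (fun k => decide (k < i) && q k) = (List.range i).countP q := by
  have h : n = i + (n - i) := by omega
  rw [h, List.range_add, List.countP_append]
  have h2 : ((List.range (n - i)).map (fun x => i + x)).countP (fun k => decide (k < i) && q k) = 0 := by
    rw [List.countP_map]
    refine List.countP_eq_zero.mpr ?_
    intro a _
    simp
  have h3 : (List.range i).countP (fun k => decide (k < i) && q k) = (List.range i).countP q :=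
    List.countP_congr (by intro a ha; simp at ha; simp [ha])
  rw [h2, h3]
  omega

-- bisect_left into a filtered range counts the false flags on a prefix
theorem pvBisectFilter (qI : Int → Bool) (n i : Nat) (hi : i ≤ n) (flags : List Bool)
    (hlen : flags.length = n) (hq : ∀ k, k < n → qI (k : Int) = !flags.getD k false) :
    PySem.List.bisectLeft ((PySem.List.pyRange 0 (n : Int) 1).filter qI) (i : Int)
      = (flags.take i).countP (fun b => !b) := by
  have hpair : ((PySem.List.pyRange 0 (n : Int) 1).filter qI).Pairwise (· ≤ ·) :=
    ((PySem.List.pairwise_lt_pyRange_one 0 (n : Int)).filter qI).imp le_of_lt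
  rw [pvBisect_count _ _ hpair, List.countP_filter, PySem.List.pyRange_zero_nat, List.countP_map]
  have hcong : (List.range n).countP ((fun y => decide (y < (i : Int)) && qI y) ∘ (fun k : Nat => (k : Int)))
      = (List.range n).countP (fun k => decide (k < i) && qI (k : Int)) :=
    List.countP_congr (by intro a _; simp [Function.comp])
  rw [hcong, pvRangeRestrict _ n i hi,
    pvRangeCountAux (fun k => qI (k : Int)) flags (by intro k hk; exact hq k (by omega)) i (by omega)]

-- pvBuildA = closed-form index map, given a correct sorted empty-index list
theorem pvBuildA_eq_indexMap (flags : List Bool) (exp : Int) (empties : List Int)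
    (h : ∀ i : Nat, i < flags.length →
      PySem.List.bisectLeft empties (i : Int) = (flags.take i).countP (fun b => !b)) :
    pvBuildA flags exp 1 [0] = pvIndexMap exp flags.length empties := by
  have hchain := pvBuildA_chain flags exp flags.length 1 [0] 0 (by omega) (by simp) (by simp)
  simp only [Nat.sub_self, List.drop_zero] at hchain
  rw [hchain, pvChain_eq_map, pvIndexMap]
  have ht1 : ((flags.length : Int) - 1).toNat = flags.length - 1 := by omega
  rw [PySem.List.pyRange_one, ht1, List.map_map, List.length_dropLast, List.singleton_append]
  congr 1
  refine List.map_congr_left ?_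
  intro t ht
  simp only [List.mem_range] at ht
  have h1 : flags.dropLast.take (t + 1) = flags.take (t + 1) := by
    rw [List.dropLast_eq_take, List.take_take]
    congr 1
    omega
  have h2 := h (t + 1) (by omega)
  rw [h1, Function.comp]
  rw [show ((1:Int) + (t:Int)) = (((t + 1 : Nat)) : Int) by push_cast; ring, h2]
  push_cast
  ring

-- membership after the inner enumerate loop over one row
theorem pvGalaxyInner (r : List Char) :
    ∀ (j : Int) (s : PySem.Set Int) (x : Int),
    (x ∈ (PySem.List.enumerate r j).foldl
        (fun s p => if p.2 = '#' then PySem.Set.add s p.1 else s) s ↔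
      x ∈ s ∨ ∃ m : Nat, m < r.length ∧ r.getD m ' ' = '#' ∧ x = j + (m : Int)) := by
  induction r with
  | nil => intro j s x; simp [PySem.List.enumerate_nil]
  | cons c rest ih =>
    intro j s x
    rw [PySem.List.enumerate_cons, List.foldl_cons, ih (j + 1)]
    have hsplit : (∃ m : Nat, m < (c :: rest).length ∧ (c :: rest).getD m ' ' = '#' ∧ x = j + (m : Int)) ↔
        ((c = '#' ∧ x = j) ∨ ∃ m : Nat, m < rest.length ∧ rest.getD m ' ' = '#' ∧ x = (j + 1) + (m : Int)) := by
      constructor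
      · rintro ⟨m, hm, hg, hx⟩
        cases m with
        | zero => exact Or.inl ⟨by simpa using hg, by simpa using hx⟩
        | succ m =>
          right
          refine ⟨m, by simpa using hm, by simpa using hg, ?_⟩
          rw [hx]
          push_cast
          ring
      · rintro (⟨hc, hx⟩ | ⟨m, hm, hg, hx⟩)
        · exact ⟨0, by simp, by simpa using hc, by simpa using hx⟩
        · refine ⟨m + 1, by simpa using hm, by simpa using hg, ?_⟩
          rw [hx]
          push_cast
          ring
    rw [hsplit]
    by_cases hc : c = '#'
    · simp [hc, PySem.Set.mem_add]
      tauto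
    · rw [if_neg (by simpa using hc)]
      tauto

-- membership in the galaxy-column set built by the double loop
theorem pvGalaxyColsMem (rows : List (List Char)) :
    ∀ (s : PySem.Set Int) (x : Int),
    (x ∈ rows.foldl (fun s r =>
      (PySem.List.enumerate r 0).foldl
        (fun s p => if p.2 = '#' then PySem.Set.add s p.1 else s) s) s ↔
    x ∈ s ∨ ∃ r ∈ rows, ∃ m : Nat, m < r.length ∧ r.getD m ' ' = '#' ∧ x = (m : Int)) := by
  induction rows with
  | nil => intro s x; simp
  | cons r rest ih =>
    intro s x
    rw [List.foldl_cons, ih, pvGalaxyInner r 0 s x]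
    simp only [List.exists_mem_cons_iff, zero_add]
    rw [or_assoc]

-- ===== VERDICT (by name: the statement is the Claim_ definition above) =====
theorem createExtensionMap_spec : Claim_equal_createExtensionMap := by
  intro image E _ hpre
  obtain ⟨hne, hgal⟩ := hpre
  unfold Spec_createExtensionMap createExtensionMap createExtensionMap_alt
  simp only []
  set rows := image.map String.toList with hrows
  have hhead : rows.headD [] = (image.headD "").toList := by
    rcases image with _ | ⟨s, t⟩
    · exact absurd rfl hne
    · simp [hrows]
  have hbound : ∀ r ∈ rows, ∀ m, (hm : m < r.length) → r[m] = '#' →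
      m < ((rows.headD []).map (fun _ => false) : List Bool).length := by
    intro r hr m hm hg
    obtain ⟨s, hs, rfl⟩ := List.mem_map.mp hr
    have := hgal s hs m hm (by rw [List.getD_eq_getElem _ _ hm]; exact hg)
    rw [List.length_map, hhead]
    exact this
  have hfst : (pvOuterA rows 0 (rows.map (fun _ => false)) ((rows.headD []).map (fun _ => false))).1
      = rows.map (fun r => r.contains '#') := by
    have := pvOuterA_fst rows [] ((rows.headD []).map (fun _ => false))
    simpa using this
  -- the row index maps agree
  have hrow : pvBuildA (pvOuterA rows 0 (rows.map (fun _ => false)) ((rows.headD []).map (fun _ => false))).1 E 1 [0]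
      = pvIndexMap E image.length
          ((PySem.List.pyRange 0 (rows.length : Int) 1).filter
            (fun i => !((PySem.List.pyGetD rows i []).contains '#'))) := by
    rw [hfst]
    have hlen : (rows.map (fun r => r.contains '#')).length = rows.length := List.length_map ..
    have h := pvBuildA_eq_indexMap (rows.map (fun r => r.contains '#')) E
      ((PySem.List.pyRange 0 (rows.length : Int) 1).filter
        (fun i => !((PySem.List.pyGetD rows i []).contains '#'))) ?_
    · rw [h, hlen]
      congr 1
      rw [hrows, List.length_map]
    · intro i hi
      rw [hlen] at hi
      refine pvBisectFilter _ rows.length i (by omega) _ hlen ?_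
      intro k hk
      simp only [PySem.List.pyGetD_natCast]
      rw [List.getD_eq_getElem _ _ (by simpa using hk),
        List.getD_eq_getElem (List.map (fun r => r.contains '#') rows) _ (by simpa using hk),
        List.getElem_map]
      simp [hrows]
  -- the column flag list of A agrees pointwise with the galaxy-column set of B
  have hseteq : ∀ k, k < (rows.headD []).length →
      (PySem.Set.contains (rows.foldl (fun s r =>
        (PySem.List.enumerate r 0).foldl
          (fun s p => if p.2 = '#' then PySem.Set.add s p.1 else s) s) PySem.Set.empty) (k : Int))
      = (pvOuterA rows 0 (rows.map (fun _ => false)) ((rows.headD []).map (fun _ => false))).2.getD k false := by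
    intro k hk
    have hiff1 : (PySem.Set.contains (rows.foldl (fun s r =>
        (PySem.List.enumerate r 0).foldl
          (fun s p => if p.2 = '#' then PySem.Set.add s p.1 else s) s) PySem.Set.empty) (k : Int)) = true ↔
        (∃ r ∈ rows, k < r.length ∧ r.getD k ' ' = '#') := by
      rw [PySem.Set.contains_iff, pvGalaxyColsMem rows PySem.Set.empty (k : Int)]
      constructor
      · rintro (h0 | ⟨r, hr, m, hm, hg, hkm⟩)
        · simp [PySem.Set.empty] at h0
        · have : m = k := by exact_mod_cast hkm.symm
          subst this
          exact ⟨r, hr, hm, hg⟩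
      · rintro ⟨r, hr, hm, hg⟩
        exact Or.inr ⟨r, hr, k, hm, hg, rfl⟩
    have hiff2 := pvOuterA_snd_getD rows 0 (rows.map (fun _ => false))
      ((rows.headD []).map (fun _ => false)) k hbound
    rw [pvGetD_map_false] at hiff2
    simp only [Bool.false_eq_true, false_or] at hiff2
    have hext : ∀ (a b : Bool), (a = true ↔ b = true) → a = b := by decide
    exact hext _ _ (hiff1.trans hiff2.symm)
  -- the column index maps agree
  have hcol : pvBuildA (pvOuterA rows 0 (rows.map (fun _ => false)) ((rows.headD []).map (fun _ => false))).2 E 1 [0]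
      = pvIndexMap E (rows.headD []).length
          ((PySem.List.pyRange 0 ((rows.headD []).length : Int) 1).filter
            (fun j => !(PySem.Set.contains (rows.foldl (fun s r =>
              (PySem.List.enumerate r 0).foldl
                (fun s p => if p.2 = '#' then PySem.Set.add s p.1 else s) s) PySem.Set.empty) j))) := by
    have hlenC : (pvOuterA rows 0 (rows.map (fun _ => false)) ((rows.headD []).map (fun _ => false))).2.length
        = (rows.headD []).length := by
      rw [pvOuterA_len, List.length_map]
    have h := pvBuildA_eq_indexMap
      (pvOuterA rows 0 (rows.map (fun _ => false)) ((rows.headD []).map (fun _ => false))).2 E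
      ((PySem.List.pyRange 0 ((rows.headD []).length : Int) 1).filter
        (fun j => !(PySem.Set.contains (rows.foldl (fun s r =>
          (PySem.List.enumerate r 0).foldl
            (fun s p => if p.2 = '#' then PySem.Set.add s p.1 else s) s) PySem.Set.empty) j))) ?_
    · rw [h, hlenC]
    · intro i hi
      rw [hlenC] at hi
      refine pvBisectFilter _ (rows.headD []).length i (by omega) _ hlenC ?_
      intro k hk
      rw [hseteq k hk]
  rw [hrow, hcol]
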